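-- pv_equiv track=rewrite | github.com/IBM/transition-amr-parser | transition_amr_parser/amr_machine.py | make_eos_force_actions
-- ===== SOURCE A (Python) =====
-- def make_eos_force_actions(tokens, sentence_ends):
--
--     force_actions = []
--
--     for (i, _) in enumerate(tokens):
--         if i in sentence_ends:
--             force_actions.append(['xANY', 'CLOSE_SENTENCE'])
--             if i == len(tokens)-1:
--                 force_actions[-1].append('SHIFT')
--         else:
--             force_actions.append(['xANY', 'SHIFT'])
--
--     return force_actions
-- ===== SOURCE B (Python) =====
-- def make_eos_force_actions(tokens, sentence_ends):
--     n = len(tokens)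
--     force_actions = [['xANY', 'SHIFT'] for _ in tokens]
--     for end in sentence_ends:
--         if 0 <= end < n:
--             force_actions[end] = ['xANY', 'CLOSE_SENTENCE']
--             if end == n - 1:
--                 force_actions[end].append('SHIFT')
--     return force_actions
-- ===== Notes on version B (the rewrite author's own statement) =====
-- stated objective: alternative
-- what changed: B builds the default ['xANY','SHIFT'] list in one pass over tokens and then patches only the in-range sentence_ends slots, instead of A's per-token membership test against sentence_ends.
import Mathlib
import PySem

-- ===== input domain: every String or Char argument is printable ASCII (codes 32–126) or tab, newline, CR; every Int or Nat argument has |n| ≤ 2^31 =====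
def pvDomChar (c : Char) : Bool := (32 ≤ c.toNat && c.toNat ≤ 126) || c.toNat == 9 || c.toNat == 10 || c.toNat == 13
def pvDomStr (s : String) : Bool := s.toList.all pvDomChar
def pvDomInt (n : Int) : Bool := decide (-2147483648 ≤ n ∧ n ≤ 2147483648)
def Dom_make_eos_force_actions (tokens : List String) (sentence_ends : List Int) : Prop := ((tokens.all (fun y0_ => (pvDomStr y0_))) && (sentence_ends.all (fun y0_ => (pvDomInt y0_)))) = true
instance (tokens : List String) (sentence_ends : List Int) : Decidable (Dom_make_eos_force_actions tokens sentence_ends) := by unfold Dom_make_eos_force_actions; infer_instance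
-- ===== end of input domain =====

-- B builds the default entries in one pass over tokens and then patches the in-range
-- sentence_ends slots, instead of A's per-token membership test against sentence_ends.

-- ===== PORT A =====
def make_eos_force_actions (tokens : List String) (sentence_ends : List Int) : List (List String) :=
  (PySem.List.enumerate tokens).foldl (fun force_actions p =>
    if p.1 ∈ sentence_ends then
      -- append ['xANY','CLOSE_SENTENCE'], then possibly append 'SHIFT' to the last entry
      let fa := force_actions ++ [["xANY", "CLOSE_SENTENCE"]]
      if p.1 = (tokens.length : Int) - 1 then
        fa.dropLast ++ [fa.getLast! ++ ["SHIFT"]]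
      else fa
    else force_actions ++ [["xANY", "SHIFT"]]) []

-- ===== PORT B =====
def make_eos_force_actions_alt (tokens : List String) (sentence_ends : List Int) : List (List String) :=
  let n : Int := tokens.length
  sentence_ends.foldl (fun fa e =>
    if 0 ≤ e ∧ e < n then
      let fa := fa.set e.toNat ["xANY", "CLOSE_SENTENCE"]
      if e = n - 1 then fa.modify e.toNat (fun l => l ++ ["SHIFT"]) else fa
    else fa) (tokens.map (fun _ => ["xANY", "SHIFT"]))

-- ===== PRECONDITION & SPEC =====
def Spec_make_eos_force_actions (tokens : List String) (sentence_ends : List Int) (out : List (List String)) : Prop := out = make_eos_force_actions_alt tokens sentence_ends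
instance (tokens : List String) (sentence_ends : List Int) (out : List (List String)) : Decidable (Spec_make_eos_force_actions tokens sentence_ends out) := by unfold Spec_make_eos_force_actions; infer_instance

-- ===== CLAIM (what is proved, stated in full; the proofs are below) =====
def Claim_equal_make_eos_force_actions : Prop := ∀ (tokens : List String) (sentence_ends : List Int), Dom_make_eos_force_actions tokens sentence_ends → Spec_make_eos_force_actions tokens sentence_ends (make_eos_force_actions tokens sentence_ends)

-- ===== LEMMAS AND PROOFS =====

/-- the per-index value both programs compute -/
def pvCell (n : Int) (ends : List Int) (i : Int) : List String :=
  if i ∈ ends then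
    if i = n - 1 then ["xANY", "CLOSE_SENTENCE", "SHIFT"] else ["xANY", "CLOSE_SENTENCE"]
  else ["xANY", "SHIFT"]

lemma A_step_eq (tokens : List String) (ends : List Int) (acc : List (List String))
    (p : Int × String) :
    (if p.1 ∈ ends then
      let fa := acc ++ [["xANY", "CLOSE_SENTENCE"]]
      if p.1 = (tokens.length : Int) - 1 then
        fa.dropLast ++ [fa.getLast! ++ ["SHIFT"]]
      else fa
    else acc ++ [["xANY", "SHIFT"]]) = acc ++ [pvCell (tokens.length : Int) ends p.1] := by
  simp only [pvCell]
  split_ifs with h1 h2 <;> simp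

lemma A_eq_map (tokens : List String) (ends : List Int) :
    make_eos_force_actions tokens ends =
      (PySem.List.pyRange 0 (tokens.length : Int) 1).map (pvCell (tokens.length : Int) ends) := by
  unfold make_eos_force_actions
  have hstep : (fun (force_actions : List (List String)) (p : Int × String) =>
      if p.1 ∈ ends then
        let fa := force_actions ++ [["xANY", "CLOSE_SENTENCE"]]
        if p.1 = (tokens.length : Int) - 1 then
          fa.dropLast ++ [fa.getLast! ++ ["SHIFT"]]
        else fa
      else force_actions ++ [["xANY", "SHIFT"]]) =
      (fun acc p => acc ++ [pvCell (tokens.length : Int) ends p.1]) := by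
    funext acc p; exact A_step_eq tokens ends acc p
  rw [hstep, PySem.List.foldl_append_singleton_eq_map]
  rw [show (PySem.List.enumerate tokens).map (fun p => pvCell (tokens.length : Int) ends p.1)
        = ((PySem.List.enumerate tokens).map (·.1)).map (pvCell (tokens.length : Int) ends)
      by rw [List.map_map]; rfl]
  rw [PySem.List.map_fst_enumerate]
  simp

/-- B's folding step -/
def pvStepB (n : Int) (fa : List (List String)) (e : Int) : List (List String) :=
  if 0 ≤ e ∧ e < n then
    let fa := fa.set e.toNat ["xANY", "CLOSE_SENTENCE"]
    if e = n - 1 then fa.modify e.toNat (fun l => l ++ ["SHIFT"]) else fa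
  else fa

lemma length_stepB (n : Int) (fa : List (List String)) (e : Int) :
    (pvStepB n fa e).length = fa.length := by
  unfold pvStepB; split_ifs <;> simp

lemma length_foldB (n : Int) (ends : List Int) (init : List (List String)) :
    (ends.foldl (pvStepB n) init).length = init.length := by
  induction ends generalizing init with
  | nil => rfl
  | cons e rest ih => simp [List.foldl_cons, ih, length_stepB]

lemma getElem?_foldB (n : Int) (ends : List Int) (init : List (List String))
    (hlen : (init.length : Int) = n) (j : Nat) (hj : (j : Int) < n) :
    (ends.foldl (pvStepB n) init)[j]? =
      if (j : Int) ∈ ends then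
        some (if (j : Int) = n - 1 then ["xANY", "CLOSE_SENTENCE", "SHIFT"]
              else ["xANY", "CLOSE_SENTENCE"])
      else init[j]? := by
  induction ends generalizing init with
  | nil => simp
  | cons e rest ih =>
    rw [List.foldl_cons,
        ih (pvStepB n init e) (by rw [length_stepB]; exact hlen)]
    by_cases hm : (j : Int) ∈ rest
    · simp [hm]
    · by_cases hje : (j : Int) = e
      · -- this step writes slot j
        have hjlt : j < init.length := by omega
        have htoNat : e.toNat = j := by omega
        have hmem : (j : Int) ∈ e :: rest := by simp [hje]
        rw [if_neg hm, if_pos hmem]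
        unfold pvStepB
        rw [if_pos (show 0 ≤ e ∧ e < n by constructor <;> omega)]
        by_cases hlast : e = n - 1
        · rw [if_pos hlast, htoNat, List.getElem?_modify,
              List.getElem?_set_self hjlt]
          have hj1 : (j : Int) = n - 1 := by omega
          simp [hj1]
        · rw [if_neg hlast, htoNat, List.getElem?_set_self hjlt]
          have hj1 : ¬ (j : Int) = n - 1 := by omega
          simp [hj1]
      · -- this step leaves slot j alone
        rw [if_neg hm, if_neg (show ¬ (j : Int) ∈ e :: rest by simp [hje, hm])]
        unfold pvStepB
        split_ifs with hcond hlast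
        · have hne : e.toNat ≠ j := by omega
          rw [List.getElem?_modify, List.getElem?_set_ne hne]
          simp [hne]
        · exact List.getElem?_set_ne (by omega)
        · rfl

-- ===== VERDICT (by name: the statement is the Claim_ definition above) =====
theorem make_eos_force_actions_spec : Claim_equal_make_eos_force_actions := by
  intro tokens ends _
  unfold Spec_make_eos_force_actions
  rw [A_eq_map]
  have halt : make_eos_force_actions_alt tokens ends =
      ends.foldl (pvStepB (tokens.length : Int))
        (tokens.map (fun _ => ["xANY", "SHIFT"])) := rfl
  rw [halt]
  apply List.ext_getElem?
  intro j
  by_cases hj : j < tokens.length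
  · rw [getElem?_foldB (tokens.length : Int) ends _ (by simp) j (by exact_mod_cast hj)]
    rw [List.getElem?_map, PySem.List.getElem?_pyRange_one]
    rw [if_pos (by simpa using hj)]
    simp only [Option.map_some, zero_add, pvCell]
    by_cases hm : (j : Int) ∈ ends
    · simp [hm]
    · simp [hm, hj]
  · have hn := Nat.le_of_not_lt hj
    rw [List.getElem?_eq_none (by simpa [PySem.List.length_pyRange_one] using hn),
        List.getElem?_eq_none (by rw [length_foldB]; simpa using hn)]
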